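-- pv_equiv track=rewrite | github.com/maximogiovanettoni/Teoria_del_Algoritmo | TP_Integrador/tercera_parte/validador.py | ubicar_barco_vertical
-- ===== SOURCE A (Python) =====
-- def adyacente_vertical(barco, tablero, columna, pos_ini, n, m):
--     if pos_ini > 0 and (tablero[pos_ini - 1][columna] == 1 or
--                         (columna > 0 and tablero[pos_ini - 1][columna - 1] == 1) or
--                         (columna < m - 1 and tablero[pos_ini - 1][columna + 1] == 1)):
--         return False
--     if pos_ini + barco < n and (tablero[pos_ini + barco][columna] == 1 or
--                                 (columna > 0 and tablero[pos_ini + barco][columna - 1] == 1) or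
--                                 (columna < m - 1 and tablero[pos_ini + barco][columna + 1] == 1)):
--         return False
--
--     for i in range(pos_ini, pos_ini + barco):
--         if (columna > 0 and tablero[i][columna - 1] == 1) or (columna < m - 1 and tablero[i][columna + 1] == 1):
--             return False
--     return True
--
-- def asignar_barco_vertical(barco, tablero, columna, pos_ini, acumulados_fila):
--     for i in range(pos_ini, pos_ini + barco):
--         tablero[i][columna] = 1
--         acumulados_fila[i] += 1
--
-- def ubicar_barco_vertical(barco, tablero, demandas_filas, demandas_columnas, acum_fila, acum_columna):
--     n = len(demandas_filas)
--     m = len(demandas_columnas)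
--     for i in range(m):
--         if acum_columna[i] + barco > demandas_columnas[i]:
--             continue
--
--         pos_primer_cero = -1
--         for j in range(n):
--             if tablero[j][i] == 1 or (acum_fila[j] + 1 > demandas_filas[j]):
--                 pos_primer_cero = -1
--                 continue
--             if pos_primer_cero == -1:
--                 pos_primer_cero = j
--             if j - pos_primer_cero == barco - 1:
--                 if not adyacente_vertical(barco, tablero, i, pos_primer_cero, n, m):
--                     pos_primer_cero = -1
--                     continue
--                 asignar_barco_vertical(barco, tablero, i, pos_primer_cero, acum_fila)
--                 acum_columna[i] += barco
--                 return True
--     return False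
-- ===== SOURCE B (Python) =====
-- def _zona_libre(barco, tablero, col, pos, n, m):
--     # No ship cell in the clipped bounding rectangle of the window, the window itself excluded.
--     for r in range(max(pos - 1, 0), min(pos + barco + 1, n)):
--         for c in range(max(col - 1, 0), min(col + 2, m)):
--             if not (c == col and pos <= r < pos + barco) and tablero[r][c] == 1:
--                 return False
--     return True
--
--
-- def _buscar_en_columna(barco, tablero, demandas_filas, acum_fila, col, n, m):
--     # Jump search over start rows: restart just past the first blocked row of the
--     # window, or advance one whole window after a failed surroundings check.
--     pos = 0
--     while pos + barco <= n:
--         tope = next((j for j in range(pos, pos + barco)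
--                      if tablero[j][col] == 1 or acum_fila[j] + 1 > demandas_filas[j]), None)
--         if tope is not None:
--             pos = tope + 1
--         elif _zona_libre(barco, tablero, col, pos, n, m):
--             return pos
--         else:
--             pos += barco
--     return None
--
--
-- def ubicar_barco_vertical(barco, tablero, demandas_filas, demandas_columnas, acum_fila, acum_columna):
--     n = len(demandas_filas)
--     m = len(demandas_columnas)
--     if barco <= 0:
--         return False
--     for col in range(m):
--         if acum_columna[col] + barco <= demandas_columnas[col]:
--             pos = _buscar_en_columna(barco, tablero, demandas_filas, acum_fila, col, n, m)
--             if pos is not None: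
--                 for r in range(pos, pos + barco):
--                     tablero[r][col] = 1
--                     acum_fila[r] += 1
--                 acum_columna[col] += barco
--                 return True
--     return False
-- ===== Notes on version B (the rewrite author's own statement) =====
-- stated objective: alternative
-- what changed: B replaces A's streaming row scan that tracks a run start (pos_primer_cero with resets) by a per-column jump search over window start rows (restart past the first blocked row, advance a whole window after a failed check), replaces A's three-part adjacency test by a single clipped bounding-rectangle scan that excludes the window itself, and replaces A's never-completing scan for barco<=0 by an explicit guard.
-- outside the precondition, e.g. on ubicar_barco_vertical(1, [[0], [0]], [1, 1], [1], [0], [0]): A returns True, B returns True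
import Mathlib
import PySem

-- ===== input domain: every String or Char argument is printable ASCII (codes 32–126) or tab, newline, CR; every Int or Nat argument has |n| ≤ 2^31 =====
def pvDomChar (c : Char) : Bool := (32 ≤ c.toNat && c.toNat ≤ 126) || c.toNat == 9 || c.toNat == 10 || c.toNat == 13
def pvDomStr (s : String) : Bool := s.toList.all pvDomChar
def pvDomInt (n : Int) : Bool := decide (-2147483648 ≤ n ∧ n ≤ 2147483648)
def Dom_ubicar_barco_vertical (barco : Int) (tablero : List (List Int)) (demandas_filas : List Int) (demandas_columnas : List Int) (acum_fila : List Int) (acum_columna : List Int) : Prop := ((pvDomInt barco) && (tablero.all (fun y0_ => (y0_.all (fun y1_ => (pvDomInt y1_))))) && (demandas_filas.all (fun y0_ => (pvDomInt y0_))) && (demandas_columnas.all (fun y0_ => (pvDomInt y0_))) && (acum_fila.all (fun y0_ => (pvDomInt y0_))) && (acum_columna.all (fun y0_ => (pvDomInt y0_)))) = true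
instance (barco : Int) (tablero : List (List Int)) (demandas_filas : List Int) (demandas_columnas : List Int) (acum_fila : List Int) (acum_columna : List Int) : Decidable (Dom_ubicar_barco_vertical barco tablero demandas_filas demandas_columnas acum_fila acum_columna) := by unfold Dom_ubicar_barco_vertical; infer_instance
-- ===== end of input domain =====

-- ===== PORT A =====
-- Header: B replaces A's streaming run-start scan by a jump search over window starts and a
-- rectangle-scan surroundings check; return-value equality only is proved (both Pythons
-- perform the same in-place mutations of tablero/acum_fila/acum_columna on success).
def pvCell (tab : List (List Int)) (r c : Int) : Int :=
  PySem.List.pyGetD (PySem.List.pyGetD tab r []) c 0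

def pvBlocked (tab : List (List Int)) (dfil afil : List Int) (i j : Int) : Bool :=
  decide (pvCell tab j i = 1 ∨ PySem.List.pyGetD afil j 0 + 1 > PySem.List.pyGetD dfil j 0)

def adyacente_vertical (barco : Int) (tab : List (List Int)) (columna pos_ini n m : Int) : Bool :=
  if pos_ini > 0 ∧ (pvCell tab (pos_ini - 1) columna = 1 ∨
      (columna > 0 ∧ pvCell tab (pos_ini - 1) (columna - 1) = 1) ∨
      (columna < m - 1 ∧ pvCell tab (pos_ini - 1) (columna + 1) = 1)) then false
  else if pos_ini + barco < n ∧ (pvCell tab (pos_ini + barco) columna = 1 ∨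
      (columna > 0 ∧ pvCell tab (pos_ini + barco) (columna - 1) = 1) ∨
      (columna < m - 1 ∧ pvCell tab (pos_ini + barco) (columna + 1) = 1)) then false
  else (PySem.List.pyRange pos_ini (pos_ini + barco) 1).all (fun i =>
      !decide ((columna > 0 ∧ pvCell tab i (columna - 1) = 1) ∨
               (columna < m - 1 ∧ pvCell tab i (columna + 1) = 1)))

-- A's inner row loop: js = remaining row indices, pos = pos_primer_cero
def pvInnerA (barco : Int) (tab : List (List Int)) (dfil afil : List Int) (i n m : Int) :
    List Int → Int → Bool
  | [], _ => false
  | j :: js, pos =>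
    if pvBlocked tab dfil afil i j then pvInnerA barco tab dfil afil i n m js (-1)
    else
      let pos' := if pos = -1 then j else pos
      if j - pos' = barco - 1 then
        if !adyacente_vertical barco tab i pos' n m then pvInnerA barco tab dfil afil i n m js (-1)
        else true
      else pvInnerA barco tab dfil afil i n m js pos'

-- A's outer column loop
def pvOuterA (barco : Int) (tab : List (List Int)) (dfil dcol afil acol : List Int) (n m : Int) :
    List Int → Bool
  | [] => false
  | i :: is =>
    if PySem.List.pyGetD acol i 0 + barco > PySem.List.pyGetD dcol i 0 then
      pvOuterA barco tab dfil dcol afil acol n m is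
    else if pvInnerA barco tab dfil afil i n m (PySem.List.pyRange 0 n 1) (-1) then true
    else pvOuterA barco tab dfil dcol afil acol n m is

def ubicar_barco_vertical (barco : Int) (tablero : List (List Int)) (demandas_filas : List Int) (demandas_columnas : List Int) (acum_fila : List Int) (acum_columna : List Int) : Bool :=
  let n : Int := demandas_filas.length
  let m : Int := demandas_columnas.length
  pvOuterA barco tablero demandas_filas demandas_columnas acum_fila acum_columna n m
    (PySem.List.pyRange 0 m 1)

-- ===== PORT B =====
-- B's surroundings check: no ship cell in the clipped bounding rectangle of the
-- window [pos, pos+barco) in column col, the window cells themselves excluded.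
def pvZona (barco : Int) (tab : List (List Int)) (col pos n m : Int) : Bool :=
  (PySem.List.pyRange (max (pos - 1) 0) (min (pos + barco + 1) n) 1).all (fun r =>
    (PySem.List.pyRange (max (col - 1) 0) (min (col + 2) m) 1).all (fun c =>
      !decide (¬(c = col ∧ pos ≤ r ∧ r < pos + barco) ∧
        PySem.List.pyGetD (PySem.List.pyGetD tab r []) c 0 = 1)))

-- B's jump search over start rows (the while loop of _buscar_en_columna); fuel bounds the
-- iteration count: pos strictly increases, the loop runs only while pos + barco ≤ n, so
-- n.toNat + 1 units of fuel are never exhausted for barco ≥ 1.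
def pvBuscar (barco : Int) (tab : List (List Int)) (dfil afil : List Int) (col n m : Int) :
    Nat → Int → Option Int
  | 0, _ => none
  | f + 1, pos =>
    if n < pos + barco then none
    else match (PySem.List.pyRange pos (pos + barco) 1).find? (fun j =>
        decide (PySem.List.pyGetD (PySem.List.pyGetD tab j []) col 0 = 1 ∨
          PySem.List.pyGetD afil j 0 + 1 > PySem.List.pyGetD dfil j 0)) with
      | some tope => pvBuscar barco tab dfil afil col n m f (tope + 1)
      | none =>
        if pvZona barco tab col pos n m then some pos
        else pvBuscar barco tab dfil afil col n m f (pos + barco)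

def ubicar_barco_vertical_alt (barco : Int) (tablero : List (List Int)) (demandas_filas : List Int) (demandas_columnas : List Int) (acum_fila : List Int) (acum_columna : List Int) : Bool :=
  let n : Int := demandas_filas.length
  let m : Int := demandas_columnas.length
  if barco ≤ 0 then false
  else (PySem.List.pyRange 0 m 1).any (fun col =>
    decide (PySem.List.pyGetD acum_columna col 0 + barco ≤ PySem.List.pyGetD demandas_columnas col 0) &&
    (pvBuscar barco tablero demandas_filas acum_fila col n m (n.toNat + 1) 0).isSome)

-- ===== PRECONDITION & SPEC =====
-- Shape condition under which Python A never indexes out of range: the accumulator/demand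
-- columns must be indexable, and if some column passes the demand guard (so rows are scanned)
-- the whole board shape must be well-formed; it is slightly narrower than A's exact returning
-- set (A can also return True early on a malformed board, before reaching the malformed part).
def Pre_ubicar_barco_vertical (barco : Int) (tablero : List (List Int)) (demandas_filas : List Int) (demandas_columnas : List Int) (acum_fila : List Int) (acum_columna : List Int) : Prop :=
  demandas_columnas.length ≤ acum_columna.length ∧
  ((∃ i ∈ PySem.List.pyRange 0 demandas_columnas.length 1,
      PySem.List.pyGetD acum_columna i 0 + barco ≤ PySem.List.pyGetD demandas_columnas i 0) →
    (demandas_filas.length ≤ tablero.length ∧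
     (∀ row ∈ tablero, demandas_columnas.length ≤ row.length) ∧
     demandas_filas.length ≤ acum_fila.length))
instance (barco : Int) (tablero : List (List Int)) (demandas_filas : List Int) (demandas_columnas : List Int) (acum_fila : List Int) (acum_columna : List Int) : Decidable (Pre_ubicar_barco_vertical barco tablero demandas_filas demandas_columnas acum_fila acum_columna) := by unfold Pre_ubicar_barco_vertical; infer_instance

def pvWitness_ubicar_barco_vertical : Int × List (List Int) × List Int × List Int × List Int × List Int :=
  (1, [[0]], [1], [1], [0], [0])

def Spec_ubicar_barco_vertical (barco : Int) (tablero : List (List Int)) (demandas_filas : List Int) (demandas_columnas : List Int) (acum_fila : List Int) (acum_columna : List Int) (out : Bool) : Prop := out = ubicar_barco_vertical_alt barco tablero demandas_filas demandas_columnas acum_fila acum_columna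
instance (barco : Int) (tablero : List (List Int)) (demandas_filas : List Int) (demandas_columnas : List Int) (acum_fila : List Int) (acum_columna : List Int) (out : Bool) : Decidable (Spec_ubicar_barco_vertical barco tablero demandas_filas demandas_columnas acum_fila acum_columna out) := by unfold Spec_ubicar_barco_vertical; infer_instance

-- ===== CLAIM (what is proved, stated in full; the proofs are below) =====
def Claim_equal_ubicar_barco_vertical : Prop := ∀ (barco : Int) (tablero : List (List Int)) (demandas_filas : List Int) (demandas_columnas : List Int) (acum_fila : List Int) (acum_columna : List Int), Dom_ubicar_barco_vertical barco tablero demandas_filas demandas_columnas acum_fila acum_columna → Pre_ubicar_barco_vertical barco tablero demandas_filas demandas_columnas acum_fila acum_columna → Spec_ubicar_barco_vertical barco tablero demandas_filas demandas_columnas acum_fila acum_columna (ubicar_barco_vertical barco tablero demandas_filas demandas_columnas acum_fila acum_columna)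

-- ===== LEMMAS AND PROOFS =====

-- B's window predicate is the negation of A's pvBlocked (pointwise).
lemma pvBlockedEq (tab : List (List Int)) (dfil afil : List Int) (i : Int) :
    (fun j => decide (PySem.List.pyGetD (PySem.List.pyGetD tab j []) i 0 = 1 ∨
        PySem.List.pyGetD afil j 0 + 1 > PySem.List.pyGetD dfil j 0)) =
    pvBlocked tab dfil afil i := by
  funext j; rfl

lemma pvAllCongr (l : List Int) (f g : Int → Bool) (h : ∀ x ∈ l, f x = g x) :
    l.all f = l.all g := by
  induction l with
  | nil => rfl
  | cons a t ih =>
    simp only [List.all_cons, h a List.mem_cons_self,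
      ih (fun x hx => h x (List.mem_cons_of_mem _ hx))]

lemma pvR1 (x y : Int) (h : y = x + 1) : PySem.List.pyRange x y 1 = [x] := by
  subst h
  rw [PySem.List.pyRange_one_cons (by omega), PySem.List.pyRange_one_eq_nil (by omega)]

lemma pvR2 (x y : Int) (h : y = x + 2) : PySem.List.pyRange x y 1 = [x, x + 1] := by
  subst h
  rw [PySem.List.pyRange_one_cons (by omega), PySem.List.pyRange_one_cons (by omega),
    PySem.List.pyRange_one_eq_nil (by omega)]

lemma pvR3 (x y : Int) (h : y = x + 3) : PySem.List.pyRange x y 1 = [x, x + 1, x + 1 + 1] := by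
  subst h
  rw [PySem.List.pyRange_one_cons (by omega), PySem.List.pyRange_one_cons (by omega),
    PySem.List.pyRange_one_cons (by omega), PySem.List.pyRange_one_eq_nil (by omega)]

lemma pvColAll (g : Int → Bool) (col m : Int) (hc : 0 ≤ col) (hm : col < m) :
    (PySem.List.pyRange (max (col - 1) 0) (min (col + 2) m) 1).all g =
    ((if 0 < col then g (col - 1) else true) &&
     (g col && (if col < m - 1 then g (col + 1) else true))) := by
  by_cases h1 : 0 < col <;> by_cases h2 : col < m - 1
  · rw [show max (col - 1) 0 = col - 1 by omega, show min (col + 2) m = col + 2 by omega,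
      pvR3 _ _ (by omega), show col - 1 + 1 = col by omega]
    simp [h1, h2]
  · rw [show max (col - 1) 0 = col - 1 by omega, show min (col + 2) m = col + 1 by omega,
      pvR2 _ _ (by omega), show col - 1 + 1 = col by omega]
    simp [h1, h2]
  · rw [show max (col - 1) 0 = col by omega, show min (col + 2) m = col + 2 by omega,
      pvR2 _ _ (by omega)]
    simp [h1, h2]
  · rw [show max (col - 1) 0 = col by omega, show min (col + 2) m = col + 1 by omega,
      pvR1 _ _ (by omega)]
    simp [h1, h2]

lemma pvIteFF (c1 c2 : Prop) [Decidable c1] [Decidable c2] (x : Bool) :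
    (if c1 then false else if c2 then false else x) = (!decide c1 && (!decide c2 && x)) := by
  by_cases h1 : c1 <;> by_cases h2 : c2 <;> simp [h1, h2]

lemma pvTopEq (barco : Int) (tab : List (List Int)) (col pos n m : Int)
    (hp : 0 ≤ pos) (hc : 0 ≤ col) (hm : col < m) :
    (PySem.List.pyRange (max (pos - 1) 0) pos 1).all (fun r =>
      (PySem.List.pyRange (max (col - 1) 0) (min (col + 2) m) 1).all (fun c =>
        !decide (¬(c = col ∧ pos ≤ r ∧ r < pos + barco) ∧
          PySem.List.pyGetD (PySem.List.pyGetD tab r []) c 0 = 1))) =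
    !decide (pos > 0 ∧ (pvCell tab (pos - 1) col = 1 ∨
      (col > 0 ∧ pvCell tab (pos - 1) (col - 1) = 1) ∨
      (col < m - 1 ∧ pvCell tab (pos - 1) (col + 1) = 1))) := by
  by_cases h0 : 0 < pos
  · rw [show max (pos - 1) 0 = pos - 1 by omega, pvR1 _ _ (by omega)]
    simp only [List.all_cons, List.all_nil, Bool.and_true]
    rw [pvColAll _ col m hc hm, ← Bool.coe_iff_coe]
    by_cases h1 : 0 < col <;> by_cases h2 : col < m - 1 <;>
      simp [h0, h1, h2, pvCell, show ¬(pos ≤ pos - 1) by omega] <;> tauto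
  · rw [show max (pos - 1) 0 = pos by omega, PySem.List.pyRange_one_eq_nil (by omega)]
    simp [h0]

lemma pvBotEq (barco : Int) (tab : List (List Int)) (col pos n m : Int)
    (hn : pos + barco ≤ n) (hc : 0 ≤ col) (hm : col < m) :
    (PySem.List.pyRange (pos + barco) (min (pos + barco + 1) n) 1).all (fun r =>
      (PySem.List.pyRange (max (col - 1) 0) (min (col + 2) m) 1).all (fun c =>
        !decide (¬(c = col ∧ pos ≤ r ∧ r < pos + barco) ∧
          PySem.List.pyGetD (PySem.List.pyGetD tab r []) c 0 = 1))) =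
    !decide (pos + barco < n ∧ (pvCell tab (pos + barco) col = 1 ∨
      (col > 0 ∧ pvCell tab (pos + barco) (col - 1) = 1) ∨
      (col < m - 1 ∧ pvCell tab (pos + barco) (col + 1) = 1))) := by
  by_cases h0 : pos + barco < n
  · rw [show min (pos + barco + 1) n = pos + barco + 1 by omega, pvR1 _ _ rfl]
    simp only [List.all_cons, List.all_nil, Bool.and_true]
    rw [pvColAll _ col m hc hm, ← Bool.coe_iff_coe]
    by_cases h1 : 0 < col <;> by_cases h2 : col < m - 1 <;>
      simp [h0, h1, h2, pvCell] <;> tauto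
  · rw [show min (pos + barco + 1) n = pos + barco by omega,
      PySem.List.pyRange_one_eq_nil (by omega)]
    simp [h0]

lemma pvMidEq (barco : Int) (tab : List (List Int)) (col pos n m : Int)
    (hc : 0 ≤ col) (hm : col < m) :
    (PySem.List.pyRange pos (pos + barco) 1).all (fun r =>
      (PySem.List.pyRange (max (col - 1) 0) (min (col + 2) m) 1).all (fun c =>
        !decide (¬(c = col ∧ pos ≤ r ∧ r < pos + barco) ∧
          PySem.List.pyGetD (PySem.List.pyGetD tab r []) c 0 = 1))) =
    (PySem.List.pyRange pos (pos + barco) 1).all (fun i =>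
      !decide ((col > 0 ∧ pvCell tab i (col - 1) = 1) ∨
               (col < m - 1 ∧ pvCell tab i (col + 1) = 1))) := by
  apply pvAllCongr
  intro r hr
  rw [PySem.List.mem_pyRange_one] at hr
  rw [pvColAll _ col m hc hm, ← Bool.coe_iff_coe]
  by_cases h1 : 0 < col <;> by_cases h2 : col < m - 1 <;>
    simp [h1, h2, hr.1, hr.2, pvCell, show ¬(col - 1 = col) by omega,
      show ¬(col + 1 = col) by omega]

-- The rectangle scan equals A's three-part adjacency test on in-range windows.
lemma pvZonaEq (barco : Int) (tab : List (List Int)) (col pos n m : Int)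
    (hb : 0 < barco) (hp : 0 ≤ pos) (hn : pos + barco ≤ n) (hc : 0 ≤ col) (hm : col < m) :
    pvZona barco tab col pos n m = adyacente_vertical barco tab col pos n m := by
  unfold pvZona adyacente_vertical
  rw [pvIteFF,
    PySem.List.pyRange_one_append (max (pos - 1) 0) pos (min (pos + barco + 1) n)
      (by omega) (by omega),
    PySem.List.pyRange_one_append pos (pos + barco) (min (pos + barco + 1) n)
      (by omega) (by omega),
    List.all_append, List.all_append,
    pvTopEq barco tab col pos n m hp hc hm,
    pvBotEq barco tab col pos n m hn hc hm,
    pvMidEq barco tab col pos n m hc hm]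
  ac_rfl


-- With a non-positive ship no window ever completes, so A's inner scan is False.
lemma pvNegA (barco : Int) (tab : List (List Int)) (dfil afil : List Int) (i n m : Int)
    (hb : barco ≤ 0) : ∀ (k : Nat) (j pos : Int), (n - j).toNat ≤ k → (pos = -1 ∨ pos ≤ j) →
    pvInnerA barco tab dfil afil i n m (PySem.List.pyRange j n 1) pos = false := by
  intro k
  induction k with
  | zero =>
    intro j pos hk _
    rw [PySem.List.pyRange_one_eq_nil (by omega)]
    rfl
  | succ k ih =>
    intro j pos hk hpos
    by_cases hjn : j < n
    · rw [PySem.List.pyRange_one_cons hjn]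
      simp only [pvInnerA]
      by_cases hbl : pvBlocked tab dfil afil i j = true
      · simp only [hbl, if_true]
        exact ih (j + 1) (-1) (by omega) (Or.inl rfl)
      · simp only [hbl, if_false, Bool.false_eq_true]
        by_cases hp1 : pos = -1
        · simp only [hp1, if_true]
          rw [if_neg (by omega)]
          exact ih (j + 1) j (by omega) (by omega)
        · simp only [if_neg hp1]
          rw [if_neg (by omega)]
          exact ih (j + 1) pos (by omega) (by omega)
    · rw [PySem.List.pyRange_one_eq_nil (by omega)]
      rfl

-- Once j + barco overshoots n, A's inner scan can never complete a window.
lemma pvDeadA (barco : Int) (tab : List (List Int)) (dfil afil : List Int) (i n m : Int)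
    (hb : 0 < barco) : ∀ (k : Nat) (j pos : Int), (n - j).toNat ≤ k → n < j + barco →
    (pos = -1 ∨ n < pos + barco) →
    pvInnerA barco tab dfil afil i n m (PySem.List.pyRange j n 1) pos = false := by
  intro k
  induction k with
  | zero =>
    intro j pos hk _ _
    rw [PySem.List.pyRange_one_eq_nil (by omega)]
    rfl
  | succ k ih =>
    intro j pos hk hov hpos
    by_cases hjn : j < n
    · rw [PySem.List.pyRange_one_cons hjn]
      simp only [pvInnerA]
      by_cases hbl : pvBlocked tab dfil afil i j = true
      · simp only [hbl, if_true]
        exact ih (j + 1) (-1) (by omega) (by omega) (Or.inl rfl)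
      · simp only [hbl, if_false, Bool.false_eq_true]
        by_cases hp1 : pos = -1
        · simp only [hp1, if_true]
          rw [if_neg (by omega)]
          exact ih (j + 1) j (by omega) (by omega) (Or.inr (by omega))
        · obtain hpp | hpp := hpos
          · exact absurd hpp hp1
          · simp only [if_neg hp1]
            rw [if_neg (by omega)]
            exact ih (j + 1) pos (by omega) (by omega) (Or.inr (by omega))
    · rw [PySem.List.pyRange_one_eq_nil (by omega)]
      rfl

-- Starting a scan at p with pos = -1 is the same as starting it with pos = p.
lemma pvStartEq (barco : Int) (tab : List (List Int)) (dfil afil : List Int) (i n m : Int)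
    (p : Int) (hp : 0 ≤ p) :
    pvInnerA barco tab dfil afil i n m (PySem.List.pyRange p n 1) (-1) =
    pvInnerA barco tab dfil afil i n m (PySem.List.pyRange p n 1) p := by
  by_cases hpn : p < n
  · rw [PySem.List.pyRange_one_cons hpn]
    simp only [pvInnerA]
    by_cases hbl : pvBlocked tab dfil afil i p = true
    · simp [hbl]
    · simp [hbl, ite_self]
  · rw [PySem.List.pyRange_one_eq_nil (by omega)]
    rfl

-- Window lemma: scanning rows j .. with run start p (window [p, p+barco)) either hits the
-- first blocked row b of the window and restarts at b+1, or completes the window.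
lemma pvWinA (barco : Int) (tab : List (List Int)) (dfil afil : List Int) (i n m : Int)
    (hb : 0 < barco) (p : Int) (hp : 0 ≤ p) :
    ∀ (d : Nat) (j : Int), 0 < d → (d : Int) ≤ barco → j = p + barco - d →
    pvInnerA barco tab dfil afil i n m (PySem.List.pyRange j n 1) p =
      (match (PySem.List.pyRange j (p + barco) 1).find? (pvBlocked tab dfil afil i) with
       | some b => pvInnerA barco tab dfil afil i n m (PySem.List.pyRange (b + 1) n 1) (-1)
       | none =>
         if p + barco ≤ n then
           (if adyacente_vertical barco tab i p n m then true
            else pvInnerA barco tab dfil afil i n m (PySem.List.pyRange (p + barco) n 1) (-1))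
         else false) := by
  intro d
  induction d with
  | zero => intro j h0 _ _; exact absurd h0 (by omega)
  | succ d ih =>
    intro j h1 hdb hj
    rw [PySem.List.pyRange_one_cons (show j < p + barco by omega)]
    by_cases hjn : j < n
    · rw [PySem.List.pyRange_one_cons hjn]
      simp only [pvInnerA]
      by_cases hbl : pvBlocked tab dfil afil i j = true
      · rw [List.find?_cons_of_pos hbl]
        simp only [hbl, if_true]
      · rw [List.find?_cons_of_neg hbl]
        simp only [hbl, if_false, Bool.false_eq_true, if_neg (show ¬p = -1 by omega)]
        by_cases hd0 : d = 0
        · subst hd0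
          rw [PySem.List.pyRange_one_eq_nil (show p + barco ≤ j + 1 by omega)]
          simp only [List.find?_nil]
          rw [if_pos (show j - p = barco - 1 by omega)]
          rw [if_pos (show p + barco ≤ n by omega)]
          have hpb : p + barco = j + 1 := by omega
          cases adyacente_vertical barco tab i p n m
          · simp only [Bool.not_false, if_true, if_false, Bool.false_eq_true, hpb]
          · simp only [Bool.not_true, if_false, if_true, Bool.false_eq_true]
        · rw [if_neg (show ¬j - p = barco - 1 by omega)]
          exact ih (j + 1) (by omega) (by omega) (by omega)
    · rw [PySem.List.pyRange_one_eq_nil (show n ≤ j by omega)]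
      by_cases hbl : pvBlocked tab dfil afil i j = true
      · rw [List.find?_cons_of_pos hbl]
        show pvInnerA barco tab dfil afil i n m [] p =
          pvInnerA barco tab dfil afil i n m (PySem.List.pyRange (j + 1) n 1) (-1)
        rw [PySem.List.pyRange_one_eq_nil (show n ≤ j + 1 by omega)]
        rfl
      · rw [List.find?_cons_of_neg hbl]
        cases hfb : (PySem.List.pyRange (j + 1) (p + barco) 1).find? (pvBlocked tab dfil afil i) with
        | none => rw [if_neg (show ¬p + barco ≤ n by omega)]; rfl
        | some b =>
          have hm := List.mem_of_find?_eq_some hfb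
          rw [PySem.List.mem_pyRange_one] at hm
          show pvInnerA barco tab dfil afil i n m [] p =
            pvInnerA barco tab dfil afil i n m (PySem.List.pyRange (b + 1) n 1) (-1)
          rw [PySem.List.pyRange_one_eq_nil (show n ≤ b + 1 by omega)]
          rfl

-- Main inner-loop equivalence: A's fresh scan from row j equals B's jump search at pos = j.
lemma pvMainEq (barco : Int) (tab : List (List Int)) (dfil afil : List Int) (i n m : Int)
    (hb : 0 < barco) (hc : 0 ≤ i) (hcm : i < m) :
    ∀ (k f : Nat) (j : Int), 0 ≤ j → (n - j).toNat < f → (n - j).toNat = k →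
    pvInnerA barco tab dfil afil i n m (PySem.List.pyRange j n 1) (-1) =
    (pvBuscar barco tab dfil afil i n m f j).isSome := by
  intro k
  induction k using Nat.strong_induction_on with
  | _ k ih =>
    intro f j hj hf hk
    obtain ⟨f', rfl⟩ : ∃ f', f = f' + 1 := ⟨f - 1, by omega⟩
    by_cases hov : n < j + barco
    · have hB : pvBuscar barco tab dfil afil i n m (f' + 1) j = none := by
        simp only [pvBuscar]; rw [if_pos hov]
      rw [hB]
      exact pvDeadA barco tab dfil afil i n m hb ((n - j).toNat) j (-1) le_rfl hov (Or.inl rfl)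
    · rw [pvStartEq barco tab dfil afil i n m j hj]
      rw [pvWinA barco tab dfil afil i n m hb j hj barco.toNat j (by omega) (by omega) (by omega)]
      simp only [pvBuscar, pvBlockedEq]
      rw [if_neg hov]
      cases hfb : (PySem.List.pyRange j (j + barco) 1).find? (pvBlocked tab dfil afil i) with
      | some b =>
        have hm := List.mem_of_find?_eq_some hfb
        rw [PySem.List.mem_pyRange_one] at hm
        exact ih ((n - (b + 1)).toNat) (by omega) f' (b + 1) (by omega) (by omega) rfl
      | none =>
        rw [if_pos (show j + barco ≤ n by omega)]
        rw [pvZonaEq barco tab i j n m hb hj (by omega) hc hcm]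
        cases adyacente_vertical barco tab i j n m
        · simp only [if_false, Bool.false_eq_true]
          exact ih ((n - (j + barco)).toNat) (by omega) f' (j + barco) (by omega) (by omega) rfl
        · simp only [if_true, Option.isSome_some]

lemma pvOutEq (barco : Int) (tab : List (List Int)) (dfil dcol afil acol : List Int) (n m : Int)
    (hb : 0 < barco) (hn : 0 ≤ n) : ∀ is : List Int, (∀ i ∈ is, 0 ≤ i ∧ i < m) →
    pvOuterA barco tab dfil dcol afil acol n m is =
    is.any (fun col =>
      decide (PySem.List.pyGetD acol col 0 + barco ≤ PySem.List.pyGetD dcol col 0) &&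
      (pvBuscar barco tab dfil afil col n m (n.toNat + 1) 0).isSome) := by
  intro is
  induction is with
  | nil => intro _; rfl
  | cons i is ih =>
    intro hmem
    obtain ⟨hi0, him⟩ := hmem i (List.mem_cons_self)
    simp only [pvOuterA, List.any_cons]
    by_cases hg : PySem.List.pyGetD acol i 0 + barco > PySem.List.pyGetD dcol i 0
    · rw [if_pos hg, ih (fun x hx => hmem x (List.mem_cons_of_mem _ hx))]
      rw [decide_eq_false (by omega)]
      simp
    · rw [if_neg hg, ih (fun x hx => hmem x (List.mem_cons_of_mem _ hx))]
      rw [decide_eq_true (by omega)]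
      rw [pvMainEq barco tab dfil afil i n m hb hi0 him ((n - 0).toNat) (n.toNat + 1) 0 le_rfl
        (by omega) rfl]
      cases (pvBuscar barco tab dfil afil i n m (n.toNat + 1) 0).isSome <;> simp

lemma pvOutNeg (barco : Int) (tab : List (List Int)) (dfil dcol afil acol : List Int) (n m : Int)
    (hb : barco ≤ 0) : ∀ is : List Int,
    pvOuterA barco tab dfil dcol afil acol n m is = false := by
  intro is
  induction is with
  | nil => rfl
  | cons i is ih =>
    simp only [pvOuterA]
    have hI := pvNegA barco tab dfil afil i n m hb (n - 0).toNat 0 (-1) le_rfl (Or.inl rfl)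
    rw [hI, ih]
    simp

lemma pvEq (barco : Int) (tablero : List (List Int)) (demandas_filas demandas_columnas acum_fila acum_columna : List Int) :
    ubicar_barco_vertical barco tablero demandas_filas demandas_columnas acum_fila acum_columna =
    ubicar_barco_vertical_alt barco tablero demandas_filas demandas_columnas acum_fila acum_columna := by
  simp only [ubicar_barco_vertical, ubicar_barco_vertical_alt]
  by_cases hb : barco ≤ 0
  · rw [if_pos hb]
    exact pvOutNeg barco tablero demandas_filas demandas_columnas acum_fila acum_columna _ _ hb _
  · rw [if_neg hb]
    exact pvOutEq barco tablero demandas_filas demandas_columnas acum_fila acum_columna _ _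
      (by omega) (Int.natCast_nonneg _) _
      (fun i hi => by rw [PySem.List.mem_pyRange_one] at hi; omega)

-- ===== VERDICT (by name: the statement is the Claim_ definition above) =====
theorem ubicar_barco_vertical_spec : Claim_equal_ubicar_barco_vertical := by
  intro barco tab dfil dcol afil acol _ _
  exact pvEq barco tab dfil dcol afil acol
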